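-- pv_equiv track=rewrite | github.com/savitharachuri/My-Solved-Leetcode | Two Pointers/Reverse Words in a String.py | reverse_each_word
-- ===== SOURCE A (Python) =====
-- def reverse(l, left, right):
--   while left < right:
--     l[left], l[right] = l[right], l[left]
--     left += 1
--     right -= 1
--
-- def reverse_each_word(l):
--   n = len(l)
--   start, end = 0, 0
--   while start < n:
--     while end < n and l[end] != " ":
--         end += 1
--     reverse(l, start, end-1)
--     start = end+1
--     end += 1
--   return l
-- ===== SOURCE B (Python) =====
-- def reverse_each_word(l):
--     out = []
--     word = []
--     for c in l:
--         if c == " ":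
--             out.extend(reversed(word))
--             out.append(c)
--             word = []
--         else:
--             word.append(c)
--     out.extend(reversed(word))
--     l[:] = out
--     return l
-- ===== Notes on version B (the rewrite author's own statement) =====
-- stated objective: simpler
-- what changed: Replaces the index-based two-pointer boundary scan with in-place swaps by a single forward pass that accumulates each word and emits it reversed into a new list (assigned back in place).
import Mathlib
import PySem

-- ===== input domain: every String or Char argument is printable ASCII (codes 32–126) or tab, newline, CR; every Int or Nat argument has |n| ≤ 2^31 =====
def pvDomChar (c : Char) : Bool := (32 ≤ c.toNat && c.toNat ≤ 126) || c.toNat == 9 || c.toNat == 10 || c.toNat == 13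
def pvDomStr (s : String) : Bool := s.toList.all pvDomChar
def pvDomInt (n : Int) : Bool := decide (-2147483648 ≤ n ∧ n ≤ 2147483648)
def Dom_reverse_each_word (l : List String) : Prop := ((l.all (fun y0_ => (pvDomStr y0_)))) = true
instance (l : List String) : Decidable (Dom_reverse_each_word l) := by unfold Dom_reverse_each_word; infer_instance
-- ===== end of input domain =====

-- B replaces A's in-place two-pointer swap reversal by a single forward pass with a word
-- accumulator (objective: simpler).  Both Pythons mutate l in place; the claim is about
-- the returned value, which equals the final list contents in both.

-- ===== PORT A =====
-- the tuple swap l[left], l[right] = l[right], l[left]; at every reachable call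
-- 0 ≤ left < right < len(l), so Nat indexing is exact here
def pvSwap (l : List String) (i j : Nat) : List String :=
  (l.set i (l.getD j "")).set j (l.getD i "")

-- while left < right: swap; left += 1; right -= 1   (the helper 'reverse')
def pvRevLoop (l : List String) (left right : Int) : List String :=
  if left < right then pvRevLoop (pvSwap l left.toNat right.toNat) (left + 1) (right - 1)
  else l
termination_by (right - left).toNat
decreasing_by omega

-- while end < n and l[end] != " ": end += 1   (0 ≤ e at every reachable call)
def pvScanEnd (l : List String) (n e : Int) : Int :=
  if e < n ∧ l.getD e.toNat "" ≠ " " then pvScanEnd l n (e + 1) else e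
termination_by (n - e).toNat
decreasing_by omega

-- needed by pvOuter's termination proof
theorem pvScanEnd_ge (l : List String) (n e : Int) : e ≤ pvScanEnd l n e := by
  unfold pvScanEnd
  split
  · have := pvScanEnd_ge l n (e + 1)
    omega
  · omega
termination_by (n - e).toNat
decreasing_by rename_i h; omega

-- A's outer while loop; in A the variables start and end are equal at every loop head
-- (both become end+1 at the bottom of the loop), so a single parameter carries both
def pvOuter (l : List String) (n start : Int) : List String :=
  if start < n then
    let e := pvScanEnd l n start
    pvOuter (pvRevLoop l start (e - 1)) n (e + 1)
  else l
termination_by (n - start).toNat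
decreasing_by have := pvScanEnd_ge l n start; omega

def reverse_each_word (l : List String) : List String :=
  pvOuter l l.length 0

-- ===== PORT B =====
-- loop body: if c == " ": out.extend(reversed(word)); out.append(c); word = [] else: word.append(c)
def pvStep (acc : List String × List String) (c : String) : List String × List String :=
  if c = " " then (acc.1 ++ acc.2.reverse ++ [c], []) else (acc.1, acc.2 ++ [c])

def reverse_each_word_alt (l : List String) : List String :=
  let p := l.foldl pvStep ([], [])
  p.1 ++ p.2.reverse

-- ===== PRECONDITION & SPEC =====
def Spec_reverse_each_word (l : List String) (out : List String) : Prop := out = reverse_each_word_alt l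
instance (l : List String) (out : List String) : Decidable (Spec_reverse_each_word l out) := by unfold Spec_reverse_each_word; infer_instance

-- ===== CLAIM (what is proved, stated in full; the proofs are below) =====
def Claim_equal_reverse_each_word : Prop := ∀ (l : List String), Dom_reverse_each_word l → Spec_reverse_each_word l (reverse_each_word l)

-- ===== LEMMAS AND PROOFS =====

-- common specification: emit each maximal space-free block reversed, keep the separators
def pvW (word : List String) : List String → List String
  | [] => word.reverse
  | c :: r => if c = " " then word.reverse ++ c :: pvW [] r else pvW (word ++ [c]) r

-- B computes pvW
theorem pvB_aux (l out word : List String) :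
    (l.foldl pvStep (out, word)).1 ++ (l.foldl pvStep (out, word)).2.reverse
      = out ++ pvW word l := by
  induction l generalizing out word with
  | nil => simp [pvW]
  | cons c r ih =>
      by_cases h : c = " "
      · simp [List.foldl_cons, pvStep, h, ih, pvW]
      · simp [List.foldl_cons, pvStep, h, ih, pvW]

theorem alt_eq_pvW (l : List String) : reverse_each_word_alt l = pvW [] l := by
  simpa [reverse_each_word_alt] using pvB_aux l [] []

-- pvW on a space-free list reverses it onto the accumulator
theorem pvW_nospace (t : List String) (ht : ∀ c ∈ t, c ≠ " ") : ∀ word,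
    pvW word t = (word ++ t).reverse := by
  induction t with
  | nil => intro word; simp [pvW]
  | cons c r ih =>
      intro word
      have hc : c ≠ " " := ht c (by simp)
      have := ih (fun d hd => ht d (by simp [hd])) (word ++ [c])
      simp [pvW, hc, this]

-- pvW past a space-free prefix followed by a space
theorem pvW_block (t : List String) (ht : ∀ c ∈ t, c ≠ " ") : ∀ (word d : List String),
    pvW word (t ++ " " :: d) = (word ++ t).reverse ++ " " :: pvW [] d := by
  induction t with
  | nil => intro word d; simp [pvW]
  | cons c r ih =>
      intro word d
      have hc : c ≠ " " := ht c (by simp)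
      have := ih (fun e he => ht e (by simp [he])) (word ++ [c]) d
      simp [pvW, hc, this]

-- the swap of the two endpoints of a block
theorem pvSwap_ends (pre mid suf : List String) (x y : String) :
    pvSwap (pre ++ x :: (mid ++ y :: suf)) pre.length (pre.length + mid.length + 1)
      = pre ++ y :: (mid ++ x :: suf) := by
  unfold pvSwap
  have hx : (pre ++ x :: (mid ++ y :: suf)).getD pre.length "" = x := by
    simp [List.getD]
  have hy : (pre ++ x :: (mid ++ y :: suf)).getD (pre.length + mid.length + 1) "" = y := by
    have h : pre ++ x :: (mid ++ y :: suf) = (pre ++ x :: mid) ++ y :: suf := by simp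
    have hl : pre.length + mid.length + 1 = (pre ++ x :: mid).length := by simp; omega
    rw [h, hl]
    simp [List.getD]
  rw [hx, hy]
  have h1 : (pre ++ x :: (mid ++ y :: suf)).set pre.length y = pre ++ y :: (mid ++ y :: suf) := by
    rw [List.set_append_right _ _ (le_refl _)]
    simp
  rw [h1]
  have h2 : pre ++ y :: (mid ++ y :: suf) = (pre ++ y :: mid) ++ y :: suf := by simp
  have hl : pre.length + mid.length + 1 = (pre ++ y :: mid).length := by simp; omega
  rw [h2, hl, List.set_append_right _ _ (le_refl _)]
  simp

-- the two-pointer loop reverses exactly the block starting at index pre.length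
theorem pvRevLoop_spec : ∀ (k : Nat) (m pre suf : List String), m.length = k →
    pvRevLoop (pre ++ m ++ suf) (pre.length : Int) ((pre.length : Int) + m.length - 1)
      = pre ++ m.reverse ++ suf := by
  intro k
  induction k using Nat.strong_induction_on with
  | _ k ih =>
    intro m pre suf hk
    match m with
    | [] => rw [pvRevLoop]; simp
    | [x] => rw [pvRevLoop]; simp
    | x :: m0 :: m1 =>
      obtain ⟨mid, y, hmy⟩ : ∃ mid y, m0 :: m1 = mid ++ [y] := by
        rcases List.eq_nil_or_concat (m0 :: m1) with h | ⟨mid, y, h⟩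
        · simp at h
        · exact ⟨mid, y, by simpa [List.concat_eq_append] using h⟩
      rw [hmy]
      rw [pvRevLoop]
      have hlen : (x :: (mid ++ [y])).length = mid.length + 2 := by simp
      rw [if_pos (by push_cast [hlen]; omega)]
      have harr : pre ++ (x :: (mid ++ [y])) ++ suf = pre ++ x :: (mid ++ y :: suf) := by simp
      have hidx : ((pre.length : Int) + (x :: (mid ++ [y])).length - 1).toNat
          = pre.length + mid.length + 1 := by push_cast [hlen]; omega
      rw [harr, hidx, Int.toNat_natCast, pvSwap_ends]
      have hre : pre ++ y :: (mid ++ x :: suf) = (pre ++ [y]) ++ mid ++ (x :: suf) := by simp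
      have hL : (pre.length : Int) + 1 = ((pre ++ [y]).length : Int) := by simp
      have hR : (pre.length : Int) + (x :: (mid ++ [y])).length - 1 - 1
          = ((pre ++ [y]).length : Int) + (mid.length : Int) - 1 := by push_cast [hlen]; omega
      rw [hre, hL, hR, ih mid.length (by rw [← hk, hmy]; simp) mid (pre ++ [y]) (x :: suf) rfl]
      simp

-- the inner while loop finds the end of the space-free block at position pre.length
theorem pvScanEnd_spec : ∀ (mid pre : List String),
    pvScanEnd (pre ++ mid) ((pre ++ mid).length : Int) (pre.length : Int)
      = (pre.length : Int) + (mid.takeWhile (· ≠ " ")).length := by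
  intro mid
  induction mid with
  | nil => intro pre; rw [pvScanEnd]; simp
  | cons c r ih =>
      intro pre
      rw [pvScanEnd]
      have hget : (pre ++ c :: r).getD ((pre.length : Int)).toNat "" = c := by
        simp [List.getD]
      by_cases hc : c = " "
      · rw [if_neg (by rw [hget, hc]; simp)]
        simp [hc, List.takeWhile]
      · rw [if_pos ⟨by exact_mod_cast (by simp : pre.length < (pre ++ c :: r).length),
          by rw [hget]; exact hc⟩]
        have h1 : pre ++ c :: r = (pre ++ [c]) ++ r := by simp
        have h2 : (pre.length : Int) + 1 = ((pre ++ [c]).length : Int) := by simp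
        rw [h1, h2, ih (pre ++ [c])]
        simp [List.takeWhile, hc]
        omega

theorem dropWhile_head_space : ∀ (mid : List String) (c : String) (d : List String),
    mid.dropWhile (· ≠ " ") = c :: d → c = " " := by
  intro mid
  induction mid with
  | nil => intro c d h; simp at h
  | cons a r ihm =>
      intro c d h
      by_cases ha : a = " "
      · rw [List.dropWhile_cons, if_neg (by simp [ha])] at h
        injection h with h1 _
        rw [← h1]; exact ha
      · rw [List.dropWhile_cons, if_pos (by simp [ha])] at h
        exact ihm c d h

-- the outer loop computes pvW on the unprocessed suffix
theorem pvOuter_spec : ∀ (k : Nat) (mid pre : List String), mid.length = k →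
    pvOuter (pre ++ mid) ((pre ++ mid).length : Int) (pre.length : Int)
      = pre ++ pvW [] mid := by
  intro k
  induction k using Nat.strong_induction_on with
  | _ k ih =>
    intro mid pre hk
    match mid with
    | [] => rw [pvOuter]; simp [pvW]
    | m0 :: mr =>
      rw [pvOuter]
      rw [if_pos (by simp)]
      rw [pvScanEnd_spec]
      set t := (m0 :: mr).takeWhile (· ≠ " ") with ht
      have htd : m0 :: mr = t ++ (m0 :: mr).dropWhile (· ≠ " ") :=
        (List.takeWhile_append_dropWhile).symm
      have htfree : ∀ c ∈ t, c ≠ " " := fun c hc => by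
        have := List.mem_takeWhile_imp hc
        simpa using this
      have hrev : pvRevLoop (pre ++ (m0 :: mr)) (pre.length : Int)
          ((pre.length : Int) + (t.length : Int) - 1)
          = pre ++ t.reverse ++ (m0 :: mr).dropWhile (· ≠ " ") := by
        have h : pre ++ (m0 :: mr) = pre ++ t ++ (m0 :: mr).dropWhile (· ≠ " ") := by
          conv_lhs => rw [htd]
          simp
        rw [h]
        exact pvRevLoop_spec t.length t pre _ rfl
      -- zeta-reduce the let from pvOuter (definitional)
      show pvOuter
          (pvRevLoop (pre ++ (m0 :: mr)) (pre.length : Int)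
            ((pre.length : Int) + ((m0 :: mr).takeWhile (· ≠ " ")).length - 1))
          (((pre ++ (m0 :: mr)).length : Int))
          ((pre.length : Int) + ((m0 :: mr).takeWhile (· ≠ " ")).length + 1)
        = pre ++ pvW [] (m0 :: mr)
      rw [← ht]
      rw [show ((pre.length : Int) + (t.length : Nat) - 1)
            = ((pre.length : Int) + (t.length : Int) - 1) from by ring]
      rw [hrev]
      match hdd : (m0 :: mr).dropWhile (· ≠ " ") with
      | [] =>
        -- no space remains: the loop exits (start' = n+1 ≥ n)
        rw [pvOuter, if_neg (by
          have hl : (m0 :: mr).length = t.length := by rw [htd, hdd]; simp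
          simp [hl])]
        rw [htd, hdd]
        simp [pvW_nospace t htfree []]
      | c :: d' =>
        have hc : c = " " := dropWhile_head_space (m0 :: mr) c d' hdd
        subst hc
        have hlen : (m0 :: mr).length = t.length + 1 + d'.length := by
          rw [htd, hdd]; simp; omega
        have harr : pre ++ t.reverse ++ (" " :: d')
            = (pre ++ t.reverse ++ [" "]) ++ d' := by simp
        have hL : (pre.length : Int) + (t.length : Int) + 1
            = ((pre ++ t.reverse ++ [" "]).length : Int) := by simp; omega
        have hlen2 : ((pre ++ (m0 :: mr)).length : Int)
            = (((pre ++ t.reverse ++ [" "]) ++ d').length : Int) := by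
          simp [hlen]; omega
        rw [harr, hL, hlen2, ih d'.length (by omega) d' (pre ++ t.reverse ++ [" "]) rfl]
        rw [htd, hdd, pvW_block t htfree [] d']
        simp

-- ===== VERDICT (by name: the statement is the Claim_ definition above) =====
theorem reverse_each_word_spec : Claim_equal_reverse_each_word := by
  intro l _
  unfold Spec_reverse_each_word reverse_each_word
  rw [alt_eq_pvW]
  have := pvOuter_spec l.length l [] rfl
  simpa using this
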